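-- pv_equiv track=rewrite | github.com/daniel880423/Member_System | file/hw2/1100317/s1100317_0.py | homework_2
-- ===== SOURCE A (Python) =====
-- def homework_2(lst): # 請同學記得把檔案名稱改成自己的學號(ex.1104813.py)
--     l = len(lst)
--     s = 0
--
--     for i in range(l):
--         if (lst[i] % 2) == 0:
--             continue
--         else:
--             lst[i] += 1
--             s += 1
--
--     for i in range(l-1):
--         if lst[i] < lst[i+1]:
--             continue
--         if lst[i] == lst[i+1]:
--             lst[i+1] = lst[i+1]+2
--             s += 2
--         else:
--             a = lst[i] + 2
--             s = s + (a-lst[i+1])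
--             lst[i+1] = a
--
--     return s
-- ===== SOURCE B (Python) =====
-- def homework_2(lst):
--     s = 0
--     prev = None
--     for i, x in enumerate(lst):
--         if x % 2:
--             x += 1
--             s += 1
--         if prev is not None and prev >= x:
--             s += prev + 2 - x
--             x = prev + 2
--         lst[i] = x
--         prev = x
--     return s
-- ===== Notes on version B (the rewrite author's own statement) =====
-- stated objective: simpler
-- what changed: A's two sequential index loops (parity fix pass, then strict-increase fix pass) are fused into one left-to-right loop over enumerate that carries only the previous finalized value and the cost, with the equal/greater branches merged into a single prev>=x case.
import Mathlib
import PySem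

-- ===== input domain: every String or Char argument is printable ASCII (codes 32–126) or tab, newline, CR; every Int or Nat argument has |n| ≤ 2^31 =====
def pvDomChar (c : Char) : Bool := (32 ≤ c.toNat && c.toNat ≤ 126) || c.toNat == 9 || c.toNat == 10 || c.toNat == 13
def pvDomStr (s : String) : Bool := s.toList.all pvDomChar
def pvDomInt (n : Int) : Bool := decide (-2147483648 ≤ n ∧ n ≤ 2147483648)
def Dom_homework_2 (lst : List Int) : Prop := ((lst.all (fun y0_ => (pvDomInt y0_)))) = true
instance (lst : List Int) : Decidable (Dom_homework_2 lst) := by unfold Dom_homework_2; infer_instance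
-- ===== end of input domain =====

-- B fuses A's two passes into one loop carrying (prev, cost); objective: simpler.
-- Both Pythons mutate lst in place identically; only the returned cost is ported and proved here.

-- ===== PORT A =====
-- first loop: parity fix at index i, counting; state = (list, s), recursion over the list
def pvPass1 : List Int → Int → (List Int × Int)
  | [], s => ([], s)
  | x :: xs, s =>
    if PySem.Int.mod x 2 == 0 then
      let r := pvPass1 xs s
      (x :: r.1, r.2)
    else
      let r := pvPass1 xs (s + 1)
      ((x + 1) :: r.1, r.2)

-- second loop: reads lst[i], lst[i+1], writes lst[i+1]; carried as recursion on the list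
def pvPass2 : List Int → Int → Int
  | [], s => s
  | [_], s => s
  | x :: y :: xs, s =>
    if x < y then pvPass2 (y :: xs) s
    else if x == y then pvPass2 ((y + 2) :: xs) (s + 2)
    else
      let a := x + 2
      pvPass2 (a :: xs) (s + (a - y))
  termination_by l _ => l.length

def homework_2 (lst : List Int) : Int :=
  let r := pvPass1 lst 0
  pvPass2 r.1 r.2

-- ===== PORT B =====
-- one fused loop; the lst[i] = x write of Source B is a side effect not affecting the return value and is omitted
def pvStep (st : Option Int × Int) (x : Int) : Option Int × Int :=
  let p1 := if PySem.Int.mod x 2 == 0 then (x, st.2) else (x + 1, st.2 + 1)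
  match st.1 with
  | none => (some p1.1, p1.2)
  | some p => if p ≥ p1.1 then (some (p + 2), p1.2 + (p + 2 - p1.1)) else (some p1.1, p1.2)

def homework_2_alt (lst : List Int) : Int :=
  (lst.foldl pvStep (none, 0)).2

-- ===== PRECONDITION & SPEC =====
def Spec_homework_2 (lst : List Int) (out : Int) : Prop := out = homework_2_alt lst
instance (lst : List Int) (out : Int) : Decidable (Spec_homework_2 lst out) := by unfold Spec_homework_2; infer_instance

-- ===== CLAIM (what is proved, stated in full; the proofs are below) =====
def Claim_equal_homework_2 : Prop := ∀ (lst : List Int), Dom_homework_2 lst → Spec_homework_2 lst (homework_2 lst)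

-- ===== LEMMAS AND PROOFS =====

def pvFix (x : Int) : Int := if PySem.Int.mod x 2 == 0 then x else x + 1
def pvCostOne (x : Int) : Int := if PySem.Int.mod x 2 == 0 then 0 else 1
def pvCost : List Int → Int
  | [] => 0
  | x :: xs => pvCostOne x + pvCost xs

theorem pvFix_t (x : Int) (h : (PySem.Int.mod x 2 == 0) = true) : pvFix x = x := by
  unfold pvFix; rw [h]; simp

theorem pvFix_f (x : Int) (h : (PySem.Int.mod x 2 == 0) = false) : pvFix x = x + 1 := by
  unfold pvFix; rw [h]; simp

theorem pvCostOne_t (x : Int) (h : (PySem.Int.mod x 2 == 0) = true) : pvCostOne x = 0 := by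
  unfold pvCostOne; rw [h]; simp

theorem pvCostOne_f (x : Int) (h : (PySem.Int.mod x 2 == 0) = false) : pvCostOne x = 1 := by
  unfold pvCostOne; rw [h]; simp

theorem pvStep_some (p s x : Int) :
    pvStep (some p, s) x =
      if p ≥ pvFix x then (some (p + 2), (s + pvCostOne x) + (p + 2 - pvFix x))
      else (some (pvFix x), s + pvCostOne x) := by
  cases hm : (PySem.Int.mod x 2 == 0)
  · simp only [pvStep, hm, Bool.false_eq_true, if_false, ite_false,
      pvFix_f x hm, pvCostOne_f x hm]
  · simp only [pvStep, hm, if_true, ite_true, pvFix_t x hm, pvCostOne_t x hm, add_zero]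

theorem pvStep_none (s x : Int) :
    pvStep (none, s) x = (some (pvFix x), s + pvCostOne x) := by
  cases hm : (PySem.Int.mod x 2 == 0)
  · simp only [pvStep, hm, Bool.false_eq_true, if_false, ite_false,
      pvFix_f x hm, pvCostOne_f x hm]
  · simp only [pvStep, hm, if_true, ite_true, pvFix_t x hm, pvCostOne_t x hm, add_zero]

theorem pvPass1_eq (xs : List Int) (s : Int) :
    pvPass1 xs s = (xs.map pvFix, s + pvCost xs) := by
  induction xs generalizing s with
  | nil => simp [pvPass1, pvCost]
  | cons x xs ih =>
    cases hm : (PySem.Int.mod x 2 == 0)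
    · simp only [pvPass1, hm, Bool.false_eq_true, if_false, ite_false, ih, List.map_cons,
        pvCost, pvFix_f x hm, pvCostOne_f x hm, Prod.mk.injEq, List.cons.injEq]
      constructor <;> first | trivial | ring
    · simp only [pvPass1, hm, if_true, ite_true, ih, List.map_cons,
        pvCost, pvFix_t x hm, pvCostOne_t x hm, Prod.mk.injEq, List.cons.injEq]
      constructor <;> first | trivial | ring

theorem pvPass2_cons (p y s : Int) (xs : List Int) :
    pvPass2 (p :: y :: xs) s =
      if p < y then pvPass2 (y :: xs) s
      else pvPass2 ((p + 2) :: xs) (s + (p + 2 - y)) := by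
  by_cases hlt : p < y
  · simp [pvPass2, hlt]
  · by_cases heq : p = y
    · subst heq
      simp [pvPass2, hlt]
    · have : ¬ (p == y) := by simp [heq]
      simp [pvPass2, hlt, this]

theorem pvFold_eq (xs : List Int) (p s : Int) :
    (xs.foldl pvStep (some p, s)).2 = pvPass2 (p :: xs.map pvFix) (s + pvCost xs) := by
  induction xs generalizing p s with
  | nil => simp [pvPass2, pvCost]
  | cons x xs ih =>
    simp only [List.foldl_cons, List.map_cons, pvCost]
    rw [pvStep_some, pvPass2_cons]
    by_cases h : p ≥ pvFix x
    · rw [if_pos h, if_neg (by omega), ih]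
      congr 1; ring
    · rw [if_neg h, if_pos (by omega), ih]
      congr 1; ring

-- ===== VERDICT (by name: the statement is the Claim_ definition above) =====
theorem homework_2_spec : Claim_equal_homework_2 := by
  intro lst _
  unfold Spec_homework_2 homework_2 homework_2_alt
  cases lst with
  | nil => simp [pvPass1, pvPass2]
  | cons x xs =>
    rw [pvPass1_eq]
    simp only [List.foldl_cons, List.map_cons]
    rw [pvStep_none, pvFold_eq]
    congr 1
    simp only [pvCost]; ring
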